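-- pv_equiv track=rewrite | github.com/lluiscv/Master-Bioinformatics-UAB | Replication.py | MissmatchPattern
-- ===== SOURCE A (Python) =====
-- def HammingDistance(p, q):
--     if len(p) == len(q):
--         count = 0
--         for i in range(len(p)):
--             if p[i] != q[i]:
--                 count += 1
--         return count
--     else:
--         return "Strings are not the same length"
--
-- def MissmatchPattern(Text, k, d, v):
--     freq = {}
--     n = len(Text)
--     best = {}
--     for i in range(n-k+1):
--         Pattern = Text[i:i+k]
--         freq[Pattern] = 0
--         for i in range(n-k+1):
--             if HammingDistance(Text[i:i+k], Pattern) <= d: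
--                 freq[Pattern] += 1
--     for i in freq:
--         if freq[i] >= v:
--             best[i] = v
--     return best
-- ===== SOURCE B (Python) =====
-- def MissmatchPattern(Text, k, d, v):
--     n = len(Text)
--     kmers = [Text[i:i+k] for i in range(n - k + 1)]
--     cnt = {}
--     for s in kmers:
--         cnt[s] = cnt.get(s, 0) + 1
--     best = {}
--     for p in cnt:
--         total = 0
--         for q, c in cnt.items():
--             if sum(a != b for a, b in zip(q, p)) <= d:
--                 total += c
--         if total >= v:
--             best[p] = v
--     return best
-- ===== Notes on version B (the rewrite author's own statement) =====
-- stated objective: alternative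
-- what changed: B builds a k-mer count dictionary in one pass and computes each frequency by a single scan over the distinct k-mers weighted by their counts, instead of A's rescan of all n-k+1 windows for every window occurrence; on duplicate-free random text the cost is similar (measured ~1.2x), the saving grows with repeated k-mers.
import Mathlib
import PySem

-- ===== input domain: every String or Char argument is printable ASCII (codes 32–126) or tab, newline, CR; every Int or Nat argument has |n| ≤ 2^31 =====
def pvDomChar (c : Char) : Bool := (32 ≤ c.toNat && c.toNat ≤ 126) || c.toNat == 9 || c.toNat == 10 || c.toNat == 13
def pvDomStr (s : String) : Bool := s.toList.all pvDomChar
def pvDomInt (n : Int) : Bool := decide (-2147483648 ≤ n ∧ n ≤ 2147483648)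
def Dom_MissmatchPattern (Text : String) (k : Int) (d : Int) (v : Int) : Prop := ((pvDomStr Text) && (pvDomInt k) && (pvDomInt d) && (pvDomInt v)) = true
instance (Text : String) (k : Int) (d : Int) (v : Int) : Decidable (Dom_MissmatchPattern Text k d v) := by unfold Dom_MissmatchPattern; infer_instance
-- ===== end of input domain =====

-- B replaces A's rescan of all n-k+1 text windows for each of the n-k+1 windows by a
-- one-pass k-mer count dictionary followed by a scan over the DISTINCT k-mers only,
-- weighted by their counts (same output, same order).

-- ===== PORT A =====
-- returns some count when the lengths match, none where the Python returns the
-- string "Strings are not the same length" (the caller's `<= d` then raises TypeError)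
def HammingDistance (p q : String) : Option Int :=
  if PySem.Str.len p = PySem.Str.len q then
    some ((PySem.List.pyRange 0 (PySem.Str.len p) 1).foldl
      (fun count i => if PySem.Str.pyGet? p i ≠ PySem.Str.pyGet? q i then count + 1 else count) 0)
  else none

def MissmatchPattern (Text : String) (k : Int) (d : Int) (v : Int) : List (String × Int) :=
  let n : Int := PySem.Str.len Text
  let freq : PySem.Dict String Int :=
    (PySem.List.pyRange 0 (n - k + 1) 1).foldl (fun freq i =>
      let Pattern := PySem.Str.slice Text (some i) (some (i + k))
      let freq := freq.insert Pattern 0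
      -- inner `for i in range(n-k+1)` (Python reuses the name i; the outer range is unaffected)
      (PySem.List.pyRange 0 (n - k + 1) 1).foldl (fun freq j =>
        match HammingDistance (PySem.Str.slice Text (some j) (some (j + k))) Pattern with
        | some h => if h ≤ d then freq.modify Pattern 0 (· + 1) else freq  -- freq[Pattern] += 1 (key present: set to 0 above)
        | none => freq)                                                     -- "..." <= d : TypeError, excluded by Pre_
        freq) PySem.Dict.empty
  -- for i in freq: if freq[i] >= v: best[i] = v   (freq[i] is the item's value: dict keys are unique)
  (freq.items.foldl (fun best p => if p.2 ≥ v then best.insert p.1 v else best)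
    (PySem.Dict.empty : PySem.Dict String Int)).items

-- ===== PORT B =====
-- sum(a != b for a, b in zip(q, p))
def pvHamZip (q p : String) : Int :=
  (q.toList.zip p.toList).foldl (fun t c => if c.1 ≠ c.2 then t + 1 else t) 0

def MissmatchPattern_alt (Text : String) (k : Int) (d : Int) (v : Int) : List (String × Int) :=
  let n : Int := PySem.Str.len Text
  let kmers := (PySem.List.pyRange 0 (n - k + 1) 1).map
    (fun i => PySem.Str.slice Text (some i) (some (i + k)))
  let cnt : PySem.Dict String Int :=
    kmers.foldl (fun c s => c.insert s (c.getD s 0 + 1)) PySem.Dict.empty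
  (cnt.items.foldl (fun best p =>
      let total := cnt.items.foldl (fun t q => if pvHamZip q.1 p.1 ≤ d then t + q.2 else t) 0
      if total ≥ v then best.insert p.1 v else best)
    (PySem.Dict.empty : PySem.Dict String Int)).items

-- ===== PRECONDITION & SPEC =====
-- Pre_ excludes only inputs on which A raises TypeError ("str" <= int): a negative k with
-- -k < len(Text) makes the window slices have unequal lengths, so HammingDistance returns
-- its error string and the comparison with d raises. On every other input A returns.
def Pre_MissmatchPattern (Text : String) (k : Int) (d : Int) (v : Int) : Prop :=
  0 ≤ k ∨ PySem.Str.len Text + k ≤ 0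
instance (Text : String) (k : Int) (d : Int) (v : Int) : Decidable (Pre_MissmatchPattern Text k d v) := by unfold Pre_MissmatchPattern; infer_instance

def pvWitness_MissmatchPattern : String × Int × Int × Int := ("ACGTAC", 3, 1, 2)

def Spec_MissmatchPattern (Text : String) (k : Int) (d : Int) (v : Int) (out : List (String × Int)) : Prop := out = MissmatchPattern_alt Text k d v
instance (Text : String) (k : Int) (d : Int) (v : Int) (out : List (String × Int)) : Decidable (Spec_MissmatchPattern Text k d v out) := by unfold Spec_MissmatchPattern; infer_instance

-- ===== CLAIM (what is proved, stated in full; the proofs are below) =====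
def Claim_equal_MissmatchPattern : Prop := ∀ (Text : String) (k : Int) (d : Int) (v : Int), Dom_MissmatchPattern Text k d v → Pre_MissmatchPattern Text k d v → Spec_MissmatchPattern Text k d v (MissmatchPattern Text k d v)

-- ===== LEMMAS AND PROOFS =====

-- the list of text windows both programs slice out
def pvKmers (Text : String) (k : Int) : List String :=
  (PySem.List.pyRange 0 (PySem.Str.len Text - k + 1) 1).map
    (fun i => PySem.Str.slice Text (some i) (some (i + k)))

-- A's count for a pattern P: how many windows lie within Hamming distance d
def pvN (Text : String) (k d : Int) (P : String) : Int :=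
  ((pvKmers Text k).countP (fun q => decide (pvHamZip q P ≤ d)) : Int)

-- every window has the same length under Pre_
lemma pvKmers_len (Text : String) (k : Int) (h : 0 ≤ k ∨ PySem.Str.len Text + k ≤ 0) :
    ∀ s ∈ pvKmers Text k, s.toList.length = (min k (PySem.Str.len Text)).toNat := by
  intro s hs
  unfold pvKmers at hs
  simp only [List.mem_map] at hs
  obtain ⟨i, hi, rfl⟩ := hs
  rw [PySem.List.mem_pyRange_one] at hi
  have hlen : (PySem.Str.slice Text (some i) (some (i + k))).toList =
      PySem.List.slice Text.toList (some i) (some (i + k)) := by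
    simp [PySem.Str.toList_slice]
  rw [hlen, PySem.List.length_slice]
  have hne : PySem.Str.len Text = (Text.toList.length : Int) := by simp [PySem.Str.len_eq]
  rw [hne] at h hi
  simp only [PySem.List.clampIdx]
  split_ifs <;> omega

-- A's index-by-index mismatch count = B's zip mismatch count, on equal-length strings
lemma pvCountIdx (a b : List Char) (h : a.length = b.length) :
    List.countP (fun i => decide (PySem.List.pyGet? a i ≠ PySem.List.pyGet? b i))
      (PySem.List.pyRange 0 (a.length : Int) 1) =
    List.countP (fun c => decide (c.1 ≠ c.2)) (a.zip b) := by
  induction a generalizing b with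
  | nil => simp
  | cons x t ih =>
    cases b with
    | nil => simp at h
    | cons y s =>
      simp only [List.length_cons] at h ⊢
      rw [PySem.List.pyRange_zero]
      have hn : ((t.length : Int) + 1).toNat = t.length + 1 := by omega
      push_cast
      rw [hn, List.range_succ_eq_map]
      simp only [List.map_cons, List.countP_cons, List.map_map, List.countP_map,
        List.zip_cons_cons, Function.comp_def]
      have h' : t.length = s.length := by omega
      have hrec := ih s h'
      rw [PySem.List.pyRange_zero, List.countP_map] at hrec
      simp only [Int.toNat_natCast, Function.comp_def] at hrec
      simp only [Nat.cast_zero, PySem.List.pyGet?_zero_cons, Nat.succ_eq_add_one,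
        Nat.cast_add, Nat.cast_one, PySem.List.pyGet?_cons_succ] at *
      rw [hrec]
      have : (decide (some x ≠ some y)) = (decide (x ≠ y)) := by simp
      rw [this]

lemma pvHD_eq_zip (q p : String) (h : q.toList.length = p.toList.length) :
    HammingDistance q p = some (pvHamZip q p) := by
  unfold HammingDistance pvHamZip
  rw [if_pos (by simp [PySem.Str.len_eq, h])]
  congr 1
  rw [PySem.List.foldl_ite_add_one (fun i => PySem.Str.pyGet? q i ≠ PySem.Str.pyGet? p i),
      PySem.List.foldl_ite_add_one (fun c : Char × Char => c.1 ≠ c.2)]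
  simp only [zero_add, Int.natCast_inj]
  have := pvCountIdx q.toList p.toList h
  simpa [PySem.Str.len_eq] using this

-- the inner recount loop, reduced: it bumps the (freshly reset) entry once per close window
lemma pvInner (l : List String) (P : String) (c : Int) (fr : PySem.Dict String Int) :
    l.foldl (fun fr _ => fr.modify P 0 (· + 1)) (fr.insert P c) =
      fr.insert P (c + l.length) := by
  induction l generalizing c with
  | nil => simp
  | cons x t ih =>
    rw [List.foldl_cons]
    have hstep : (fr.insert P c).modify P 0 (· + 1) = fr.insert P (c + 1) := by
      rw [PySem.Dict.modify, PySem.Dict.getD_insert_self, PySem.Dict.insert_insert_self]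
    rw [hstep, ih]
    congr 1
    simp
    ring

-- fold of key-determined inserts: the final value at P
lemma pvGetD_foldl_insert_fn (l : List String) (f : String → Int) (d : PySem.Dict String Int)
    (P : String) (dflt : Int) :
    (l.foldl (fun d x => d.insert x (f x)) d).getD P dflt =
      if P ∈ l then f P else d.getD P dflt := by
  induction l generalizing d with
  | nil => simp
  | cons x t ih =>
    simp only [List.foldl_cons, ih, List.mem_cons, PySem.Dict.getD_insert]
    by_cases hx : P = x
    · subst hx; by_cases ht : P ∈ t <;> simp [ht]
    · by_cases ht : P ∈ t <;> simp [ht, hx]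

-- A's frequency dict, characterised: one entry per distinct window, valued by pvN
lemma pvFreqItems (Text : String) (k d : Int)
    (h : 0 ≤ k ∨ PySem.Str.len Text + k ≤ 0) :
    ((PySem.List.pyRange 0 (PySem.Str.len Text - k + 1) 1).foldl (fun freq i =>
      let Pattern := PySem.Str.slice Text (some i) (some (i + k))
      let freq := freq.insert Pattern 0
      (PySem.List.pyRange 0 (PySem.Str.len Text - k + 1) 1).foldl (fun freq j =>
        match HammingDistance (PySem.Str.slice Text (some j) (some (j + k))) Pattern with
        | some h => if h ≤ d then freq.modify Pattern 0 (· + 1) else freq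
        | none => freq)
        freq) (PySem.Dict.empty : PySem.Dict String Int)).items =
      (PySem.Set.ofList (pvKmers Text k)).map (fun P => (P, pvN Text k d P)) := by
  have hlen := pvKmers_len Text k h
  have hfold :
      (PySem.List.pyRange 0 (PySem.Str.len Text - k + 1) 1).foldl (fun freq i =>
        let Pattern := PySem.Str.slice Text (some i) (some (i + k))
        let freq := freq.insert Pattern 0
        (PySem.List.pyRange 0 (PySem.Str.len Text - k + 1) 1).foldl (fun freq j =>
          match HammingDistance (PySem.Str.slice Text (some j) (some (j + k))) Pattern with
          | some h => if h ≤ d then freq.modify Pattern 0 (· + 1) else freq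
          | none => freq)
          freq) (PySem.Dict.empty : PySem.Dict String Int) =
      (pvKmers Text k).foldl (fun freq P => freq.insert P (pvN Text k d P)) PySem.Dict.empty := by
    rw [pvKmers, List.foldl_map]
    apply PySem.List.foldl_congr_mem
    intro fr i hi
    simp only
    have hP : PySem.Str.slice Text (some i) (some (i + k)) ∈ pvKmers Text k := by
      unfold pvKmers; exact List.mem_map_of_mem hi
    set P := PySem.Str.slice Text (some i) (some (i + k)) with hPdef
    have hinner :
        (PySem.List.pyRange 0 (PySem.Str.len Text - k + 1) 1).foldl (fun freq j =>
          match HammingDistance (PySem.Str.slice Text (some j) (some (j + k))) P with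
          | some h => if h ≤ d then freq.modify P 0 (· + 1) else freq
          | none => freq) (fr.insert P 0) =
        (pvKmers Text k).foldl (fun freq q =>
          if pvHamZip q P ≤ d then freq.modify P 0 (· + 1) else freq) (fr.insert P 0) := by
      rw [pvKmers, List.foldl_map]
      apply PySem.List.foldl_congr_mem
      intro fr' j hj
      have hq : PySem.Str.slice Text (some j) (some (j + k)) ∈ pvKmers Text k := by
        unfold pvKmers; exact List.mem_map_of_mem hj
      rw [pvHD_eq_zip _ _ (by rw [hlen _ hq, hlen _ hP])]
    rw [hinner, PySem.List.foldl_ite_eq_foldl_filter (fun q => pvHamZip q P ≤ d)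
      (fun (fr' : PySem.Dict String Int) (_ : String) => fr'.modify P 0 (· + 1)),
      pvInner, zero_add, pvN, List.countP_eq_length_filter]
  rw [hfold]
  have hkeys : ((pvKmers Text k).foldl
      (fun freq P => freq.insert P (pvN Text k d P)) PySem.Dict.empty).keys =
      PySem.Set.ofList (pvKmers Text k) := by
    rw [PySem.Dict.keys_foldl_insert (pvKmers Text k) (fun _ x => pvN Text k d x)]
    rfl
  rw [PySem.Dict.items_eq_map_keys _ (by rw [hkeys]; exact PySem.Set.nodup_ofList _) 0, hkeys]
  apply List.map_congr_left
  intro P hPm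
  have : P ∈ pvKmers Text k := (PySem.Set.mem_ofList _ _).mp hPm
  rw [pvGetD_foldl_insert_fn, if_pos this]

-- B's per-pattern total over the count dictionary = A's count over all windows
lemma pvTotal (Text : String) (k d : Int) (p : String) :
    ((PySem.Set.ofList (pvKmers Text k)).map
        (fun q => (q, (List.count q (pvKmers Text k) : Int)))).foldl
      (fun t q => if pvHamZip q.1 p ≤ d then t + q.2 else t) 0 = pvN Text k d p := by
  set l := pvKmers Text k with hl
  rw [List.foldl_map]
  have hbody : ∀ (t : Int), ∀ q ∈ PySem.Set.ofList l,
      (if pvHamZip q p ≤ d then t + (List.count q l : Int) else t) =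
      t + (if pvHamZip q p ≤ d then (List.count q l : Int) else 0) := by
    intro t q _; split_ifs <;> simp
  rw [PySem.List.foldl_congr_mem _ _ _ _ hbody,
      PySem.List.foldl_add (g := fun q => if pvHamZip q p ≤ d then (List.count q l : Int) else 0),
      zero_add]
  rw [← List.sum_toFinset _ (PySem.Set.nodup_ofList l)]
  have hfs : (PySem.Set.ofList l).toFinset = l.toFinset := by
    ext x; simp [List.mem_toFinset, PySem.Set.mem_ofList]
  rw [hfs]
  have hcnt := Finset.sum_list_map_count l (fun q => if pvHamZip q p ≤ d then (1 : Int) else 0)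
  have hio : (List.map (fun q => if pvHamZip q p ≤ d then (1 : Int) else 0) l).sum =
      ((l.countP (fun q => decide (pvHamZip q p ≤ d)) : Int)) := by
    simpa using PySem.List.sum_map_ite_one_zero (fun q => decide (pvHamZip q p ≤ d)) l
  rw [hio] at hcnt
  rw [pvN, ← hl, hcnt]
  apply Finset.sum_congr rfl
  intro q _
  split_ifs <;> simp

-- ===== VERDICT (by name: the statement is the Claim_ definition above) =====
theorem MissmatchPattern_spec : Claim_equal_MissmatchPattern := by
  intro Text k d v _ hpre
  unfold Spec_MissmatchPattern
  unfold MissmatchPattern MissmatchPattern_alt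
  simp only
  rw [pvFreqItems Text k d hpre]
  rw [show ((PySem.List.pyRange 0 (PySem.Str.len Text - k + 1) 1).map
      (fun i => PySem.Str.slice Text (some i) (some (i + k)))) = pvKmers Text k from rfl]
  rw [PySem.Dict.foldl_insert_getD_add_one_eq_counter, PySem.Dict.items_counter]
  congr 1
  rw [List.foldl_map, List.foldl_map]
  apply PySem.List.foldl_congr_mem
  intro best P hP
  simp only
  rw [pvTotal Text k d P]
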